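-- pv_equiv track=rewrite | github.com/cwchilders/OpenMic | tonex/analyze_preset_params.py | compare_presets
-- ===== SOURCE A (Python) =====
-- from typing import List, Dict, Tuple
--
-- def compare_presets(columns: List[str], preset1_data: List[str], preset2_data: List[str],
--                    preset1_name: str, preset2_name: str) -> Dict[str, List[Tuple[str, str, str]]]:
--     """Compare two presets and show differences"""
--     differences = {}
--
--     for i, col in enumerate(columns):
--         if i < len(preset1_data) and i < len(preset2_data):
--             val1 = preset1_data[i]
--             val2 = preset2_data[i]
--
--             if val1 != val2:
--                 # Skip GUID and similar unique identifiers
--                 if col not in ['GUID', 'ToneModel_GUID', 'OptionalToneModel_GUID', 'Tag_PresetName']: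
--                     category = None
--                     if col.startswith('HWParam'):
--                         continue  # Skip hardware params for now
--                     elif col.startswith('Eq') or col.startswith('PwrAmpEq'):
--                         category = 'EQ'
--                     elif col.startswith('Mod'):
--                         category = 'Modulation'
--                     elif col.startswith('Delay'):
--                         category = 'Delay'
--                     elif col.startswith('Reverb'):
--                         category = 'Reverb'
--                     elif col.startswith('Model'):
--                         category = 'Amp Model'
--                     elif col.startswith('Comp'):
--                         category = 'Compression'
--                     elif col.startswith('NoiseGate'):
--                         category = 'Noise Gate'
--                     elif col.startswith('Cab') or col.startswith('VIRCab'):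
--                         category = 'Cabinet'
--                     else:
--                         category = 'Other'
--
--                     if category not in differences:
--                         differences[category] = []
--                     differences[category].append((col, val1, val2))
--
--     return differences
-- ===== SOURCE B (Python) =====
-- from typing import List, Dict, Tuple
--
-- _SKIP = frozenset({'GUID', 'ToneModel_GUID', 'OptionalToneModel_GUID', 'Tag_PresetName'})
--
-- # (prefix, category) in the precedence order of the original cascade; None = skip
-- _CATS = [
--     ('HWParam', None),
--     ('Eq', 'EQ'),
--     ('PwrAmpEq', 'EQ'),
--     ('Mod', 'Modulation'),
--     ('Delay', 'Delay'),
--     ('Reverb', 'Reverb'),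
--     ('Model', 'Amp Model'),
--     ('Comp', 'Compression'),
--     ('NoiseGate', 'Noise Gate'),
--     ('Cab', 'Cabinet'),
--     ('VIRCab', 'Cabinet'),
-- ]
--
-- def _categorize(col):
--     """Category of a column, or None if the column is excluded from the report."""
--     if col in _SKIP:
--         return None
--     for prefix, cat in _CATS:
--         if col.startswith(prefix):
--             return cat
--     return 'Other'
--
-- def compare_presets(columns: List[str], preset1_data: List[str], preset2_data: List[str],
--                     preset1_name: str, preset2_name: str) -> Dict[str, List[Tuple[str, str, str]]]:
--     """Compare two presets and show differences"""
--     # stage 1: tag each differing, reportable column with its category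
--     tagged = [(cat, (col, v1, v2))
--               for col, v1, v2 in zip(columns, preset1_data, preset2_data)
--               if v1 != v2
--               for cat in [_categorize(col)]
--               if cat is not None]
--     # stage 2: categories in first-appearance order
--     order = list(dict.fromkeys(cat for cat, _ in tagged))
--     # stage 3: group by filtering the tagged list once per category
--     return {cat: [item for c, item in tagged if c == cat] for cat in order}
-- ===== Notes on version B (the rewrite author's own statement) =====
-- stated objective: alternative
-- what changed: Replaces the single streaming pass that accumulates into a dict-of-lists branch by branch with three staged passes: tag each differing column with its category via a prefix-table lookup, dedupe the categories in first-appearance order with dict.fromkeys, then build the result by filtering the tagged list once per category (a group-by, no incremental dict mutation).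
import Mathlib
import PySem

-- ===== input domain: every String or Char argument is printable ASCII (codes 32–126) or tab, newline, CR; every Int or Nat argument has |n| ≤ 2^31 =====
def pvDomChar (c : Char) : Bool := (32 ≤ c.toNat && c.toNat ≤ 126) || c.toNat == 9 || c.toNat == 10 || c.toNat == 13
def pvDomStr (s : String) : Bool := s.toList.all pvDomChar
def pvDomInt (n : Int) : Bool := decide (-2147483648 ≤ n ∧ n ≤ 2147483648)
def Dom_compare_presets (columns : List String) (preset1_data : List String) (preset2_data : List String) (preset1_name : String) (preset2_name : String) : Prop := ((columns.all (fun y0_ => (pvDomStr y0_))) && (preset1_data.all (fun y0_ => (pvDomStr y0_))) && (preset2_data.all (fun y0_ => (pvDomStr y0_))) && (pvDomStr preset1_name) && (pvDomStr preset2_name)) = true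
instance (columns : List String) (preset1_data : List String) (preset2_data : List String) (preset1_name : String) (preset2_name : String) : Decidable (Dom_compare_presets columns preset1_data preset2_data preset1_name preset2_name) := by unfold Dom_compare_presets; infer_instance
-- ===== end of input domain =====

-- B replaces A's streaming dict-of-lists accumulation with three staged passes:
-- tag differing columns with a category, dedupe categories in first-appearance
-- order, then group by filtering the tagged list per category.

-- ===== PORT A =====
-- loop body of A's `for i, col in enumerate(columns)` (the dict is threaded as the state;
-- inside the length guard the indices are in range, so pyGetD with a dummy default is exact)
def compareStepA (preset1_data : List String) (preset2_data : List String)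
    (differences : PySem.Dict String (List (String × String × String))) (ic : Int × String) :
    PySem.Dict String (List (String × String × String)) :=
  let i := ic.1
  let col := ic.2
  if i < (preset1_data.length : Int) ∧ i < (preset2_data.length : Int) then
    let val1 := PySem.List.pyGetD preset1_data i ""
    let val2 := PySem.List.pyGetD preset2_data i ""
    if val1 ≠ val2 then
      if col ∉ ["GUID", "ToneModel_GUID", "OptionalToneModel_GUID", "Tag_PresetName"] then
        if PySem.Str.startswith col "HWParam" then differences  -- continue: skip hardware params
        else
          let category : String :=
            if PySem.Str.startswith col "Eq" || PySem.Str.startswith col "PwrAmpEq" then "EQ"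
            else if PySem.Str.startswith col "Mod" then "Modulation"
            else if PySem.Str.startswith col "Delay" then "Delay"
            else if PySem.Str.startswith col "Reverb" then "Reverb"
            else if PySem.Str.startswith col "Model" then "Amp Model"
            else if PySem.Str.startswith col "Comp" then "Compression"
            else if PySem.Str.startswith col "NoiseGate" then "Noise Gate"
            else if PySem.Str.startswith col "Cab" || PySem.Str.startswith col "VIRCab" then "Cabinet"
            else "Other"
          -- `if category not in differences: differences[category] = []` + append
          differences.modify category [] (fun l => l ++ [(col, val1, val2)])
      else differences
    else differences
  else differences

def compare_presets (columns : List String) (preset1_data : List String) (preset2_data : List String) (preset1_name : String) (preset2_name : String) : List (String × List (String × String × String)) :=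
  ((PySem.List.enumerate columns 0).foldl (compareStepA preset1_data preset2_data)
    PySem.Dict.empty).items

-- ===== PORT B =====
-- _SKIP
def pvSkip : PySem.Set String :=
  PySem.Set.ofList ["GUID", "ToneModel_GUID", "OptionalToneModel_GUID", "Tag_PresetName"]

-- _CATS: (prefix, category) in the precedence order of the original cascade; none = skip
def pvCats : List (String × Option String) :=
  [("HWParam", none), ("Eq", some "EQ"), ("PwrAmpEq", some "EQ"), ("Mod", some "Modulation"),
   ("Delay", some "Delay"), ("Reverb", some "Reverb"), ("Model", some "Amp Model"),
   ("Comp", some "Compression"), ("NoiseGate", some "Noise Gate"),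
   ("Cab", some "Cabinet"), ("VIRCab", some "Cabinet")]

-- _categorize: skip-set check, then the first matching prefix of _CATS, else 'Other'
def pvCategorize (col : String) : Option String :=
  if col ∈ pvSkip then none
  else
    match pvCats.find? (fun pc => PySem.Str.startswith col pc.1) with
    | some pc => pc.2
    | none => some "Other"

-- stage-1 comprehension body: tag a zipped (col, v1, v2) triple, or drop it
def pvTag (x : String × String × String) : Option (String × (String × String × String)) :=
  if x.2.1 ≠ x.2.2 then (pvCategorize x.1).map (fun cat => (cat, x.1, x.2.1, x.2.2))
  else none

def compare_presets_alt (columns : List String) (preset1_data : List String) (preset2_data : List String) (preset1_name : String) (preset2_name : String) : List (String × List (String × String × String)) :=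
  -- stage 1: tag each differing, reportable column with its category
  let tagged := (columns.zip (preset1_data.zip preset2_data)).filterMap pvTag
  -- stage 2: categories in first-appearance order (dict.fromkeys)
  let order := PySem.List.dedup (tagged.map Prod.fst)
  -- stage 3: group by filtering the tagged list once per category
  order.map (fun cat => (cat, (tagged.filter (fun t => t.1 == cat)).map (·.2)))

-- ===== PRECONDITION & SPEC =====
def Spec_compare_presets (columns : List String) (preset1_data : List String) (preset2_data : List String) (preset1_name : String) (preset2_name : String) (out : List (String × List (String × String × String))) : Prop := out = compare_presets_alt columns preset1_data preset2_data preset1_name preset2_name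
instance (columns : List String) (preset1_data : List String) (preset2_data : List String) (preset1_name : String) (preset2_name : String) (out : List (String × List (String × String × String))) : Decidable (Spec_compare_presets columns preset1_data preset2_data preset1_name preset2_name out) := by unfold Spec_compare_presets; infer_instance

-- ===== CLAIM (what is proved, stated in full; the proofs are below) =====
def Claim_equal_compare_presets : Prop := ∀ (columns : List String) (preset1_data : List String) (preset2_data : List String) (preset1_name : String) (preset2_name : String), Dom_compare_presets columns preset1_data preset2_data preset1_name preset2_name → Spec_compare_presets columns preset1_data preset2_data preset1_name preset2_name (compare_presets columns preset1_data preset2_data preset1_name preset2_name)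

-- ===== LEMMAS AND PROOFS =====

-- the grouping fold A's loop reduces to (proof-side only)
def pvGStep (d : PySem.Dict String (List (String × String × String)))
    (p : String × (String × String × String)) :
    PySem.Dict String (List (String × String × String)) :=
  d.modify p.1 [] (fun l => l ++ [p.2])

-- B's categorizer computes A's cascade (none = skipped column)
lemma categorize_cascade (c : String)
    (hm : c ∉ ["GUID", "ToneModel_GUID", "OptionalToneModel_GUID", "Tag_PresetName"]) :
    pvCategorize c =
      (if PySem.Str.startswith c "HWParam" then none
       else some
        (if PySem.Str.startswith c "Eq" || PySem.Str.startswith c "PwrAmpEq" then "EQ"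
         else if PySem.Str.startswith c "Mod" then "Modulation"
         else if PySem.Str.startswith c "Delay" then "Delay"
         else if PySem.Str.startswith c "Reverb" then "Reverb"
         else if PySem.Str.startswith c "Model" then "Amp Model"
         else if PySem.Str.startswith c "Comp" then "Compression"
         else if PySem.Str.startswith c "NoiseGate" then "Noise Gate"
         else if PySem.Str.startswith c "Cab" || PySem.Str.startswith c "VIRCab" then "Cabinet"
         else "Other")) := by
  have hms : c ∉ pvSkip := by
    simp only [pvSkip, PySem.Set.mem_ofList]
    simpa using hm
  simp only [pvCategorize, if_neg hms, pvCats, List.find?]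
  by_cases h0 : PySem.Chars.startswith c.toList ['H','W','P','a','r','a','m'] = true <;> simp [h0]
  by_cases h1 : PySem.Chars.startswith c.toList ['E','q'] = true <;> simp [h1]
  by_cases h2 : PySem.Chars.startswith c.toList ['P','w','r','A','m','p','E','q'] = true <;> simp [h2]
  by_cases h3 : PySem.Chars.startswith c.toList ['M','o','d'] = true <;> simp [h3]
  by_cases h4 : PySem.Chars.startswith c.toList ['D','e','l','a','y'] = true <;> simp [h4]
  by_cases h5 : PySem.Chars.startswith c.toList ['R','e','v','e','r','b'] = true <;> simp [h5]
  by_cases h6 : PySem.Chars.startswith c.toList ['M','o','d','e','l'] = true <;> simp [h6]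
  by_cases h7 : PySem.Chars.startswith c.toList ['C','o','m','p'] = true <;> simp [h7]
  by_cases h8 : PySem.Chars.startswith c.toList ['N','o','i','s','e','G','a','t','e'] = true <;> simp [h8]
  by_cases h9 : PySem.Chars.startswith c.toList ['C','a','b'] = true <;> simp [h9]
  by_cases h10 : PySem.Chars.startswith c.toList ['V','I','R','C','a','b'] = true <;> simp [h10]

-- A's loop body at an in-range index is the tag-then-group step
lemma step_a_tag (p1 p2 : List String) (s : Nat) (h1 : s < p1.length) (h2 : s < p2.length)
    (d : PySem.Dict String (List (String × String × String))) (c : String) :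
    compareStepA p1 p2 d ((s : Int), c) =
      (match pvTag (c, p1[s], p2[s]) with
       | none => d
       | some y => pvGStep d y) := by
  have hg : ((s : Int) < (p1.length : Int) ∧ (s : Int) < (p2.length : Int)) := by
    exact_mod_cast And.intro h1 h2
  have e1 : PySem.List.pyGetD p1 (s : Int) "" = p1[s] := by
    rw [PySem.List.pyGetD_natCast, List.getD_eq_getElem _ _ h1]
  have e2 : PySem.List.pyGetD p2 (s : Int) "" = p2[s] := by
    rw [PySem.List.pyGetD_natCast, List.getD_eq_getElem _ _ h2]
  by_cases hv : p1[s] = p2[s]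
  · simp [compareStepA, pvTag, hg, e1, e2, hv]
  · by_cases hm : c ∈ ["GUID", "ToneModel_GUID", "OptionalToneModel_GUID", "Tag_PresetName"]
    · have hms : c ∈ pvSkip := by
        simp only [pvSkip, PySem.Set.mem_ofList]
        simpa using hm
      simp [compareStepA, pvTag, pvCategorize, hg, e1, e2, hv, hm, hms]
    · simp only [pvTag, if_pos (by simpa using hv)]
      rw [categorize_cascade c hm]
      by_cases hHW : PySem.Chars.startswith c.toList ['H','W','P','a','r','a','m'] = true
      · rw [if_pos (by simpa using hHW)]
        simp [compareStepA, hg, e1, e2, hv, hm, hHW]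
      · rw [if_neg (by simpa using hHW)]
        simp [compareStepA, pvGStep, hg, e1, e2, hv, hm, hHW]
-- the loop body is the identity when an index is out of range
lemma step_a_skip (p1 p2 : List String) (s : Nat) (h : ¬ (s < p1.length ∧ s < p2.length))
    (d : PySem.Dict String (List (String × String × String))) (c : String) :
    compareStepA p1 p2 d ((s : Int), c) = d := by
  simp only [compareStepA]
  rw [if_neg (by exact_mod_cast h)]

-- A's enumerate loop from index s = the grouping fold over the tagged zip (s items dropped)
lemma loop_eq (cols : List String) : ∀ (s : Nat) (p1 p2 : List String)
    (d : PySem.Dict String (List (String × String × String))),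
    (PySem.List.enumerate cols (s : Int)).foldl (compareStepA p1 p2) d
      = ((cols.zip ((p1.drop s).zip (p2.drop s))).filterMap pvTag).foldl pvGStep d := by
  induction cols with
  | nil => intro s p1 p2 d; simp [PySem.List.enumerate_nil]
  | cons c cs ih =>
    intro s p1 p2 d
    rw [PySem.List.enumerate_cons, List.foldl_cons]
    have hcast : (s : Int) + 1 = ((s + 1 : Nat) : Int) := by push_cast; ring
    by_cases h1 : s < p1.length
    · by_cases h2 : s < p2.length
      · rw [List.drop_eq_getElem_cons h1, List.drop_eq_getElem_cons h2]
        simp only [List.zip_cons_cons, List.filterMap_cons]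
        rw [step_a_tag p1 p2 s h1 h2, hcast, ih (s + 1) p1 p2]
        cases pvTag (c, p1[s], p2[s]) <;> simp
      · have hd2 : p2.drop s = [] := List.drop_eq_nil_of_le (by omega)
        have hd2' : p2.drop (s + 1) = [] := List.drop_eq_nil_of_le (by omega)
        rw [step_a_skip p1 p2 s (by omega), hcast, ih (s + 1) p1 p2]
        simp [hd2, hd2']
    · have hd1 : p1.drop s = [] := List.drop_eq_nil_of_le (by omega)
      have hd1' : p1.drop (s + 1) = [] := List.drop_eq_nil_of_le (by omega)
      rw [step_a_skip p1 p2 s (by omega), hcast, ih (s + 1) p1 p2]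
      simp [hd1, hd1']

-- the items of the grouping fold from empty ARE B's staged group-by
lemma items_gfold (L : List (String × (String × String × String))) :
    (L.foldl pvGStep PySem.Dict.empty).items
      = (PySem.List.dedup (L.map Prod.fst)).map
          (fun cat => (cat, (L.filter (fun t => t.1 == cat)).map (·.2))) := by
  have hnd : (L.foldl pvGStep PySem.Dict.empty).keys.Nodup := by
    simpa [pvGStep] using
      PySem.Dict.nodup_keys_foldl_modify_key L Prod.fst ([] : List (String × String × String))
        (fun _ p => fun l => l ++ [p.2])
        (PySem.Dict.empty : PySem.Dict String (List (String × String × String))) (by simp)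
  have hkeys : (L.foldl pvGStep PySem.Dict.empty).keys
      = PySem.Set.update (PySem.Dict.empty : PySem.Dict String (List (String × String × String))).keys
          (L.map Prod.fst) := by
    simpa [pvGStep] using
      PySem.Dict.keys_foldl_modify_key L Prod.fst ([] : List (String × String × String))
        (fun _ p => fun l => l ++ [p.2])
        (PySem.Dict.empty : PySem.Dict String (List (String × String × String)))
  have hget : ∀ cat, (L.foldl pvGStep PySem.Dict.empty).getD cat []
      = (L.filter (fun t => t.1 == cat)).map (·.2) := by
    intro cat
    simpa [pvGStep] using
      PySem.Dict.getD_foldl_modify_append L PySem.Dict.empty cat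
  rw [PySem.Dict.items_eq_map_keys _ hnd [], hkeys]
  have hupd : PySem.Set.update (PySem.Dict.empty : PySem.Dict String (List (String × String × String))).keys
        (L.map Prod.fst)
      = PySem.List.dedup (L.map Prod.fst) := by
    simp [PySem.Set.update, PySem.Set.ofList_eq_foldl]
  rw [hupd]
  exact List.map_congr_left (fun cat _ => by rw [hget cat])

-- ===== VERDICT (by name: the statement is the Claim_ definition above) =====
theorem compare_presets_spec : Claim_equal_compare_presets := by
  intro columns p1 p2 n1 n2 _
  unfold Spec_compare_presets compare_presets compare_presets_alt
  have h := loop_eq columns 0 p1 p2 PySem.Dict.empty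
  simp only [Nat.cast_zero, List.drop_zero] at h
  rw [h, items_gfold]
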